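-- pv_equiv track=rewrite | github.com/sumitrevolt/flash-loan-arbitrage-system | mcp_servers/risk_management_mcp_server.py | get_risk_recommendations
-- ===== SOURCE A (Python) =====
-- def get_risk_recommendations(risk_factors: list) -> list:
--     """Get recommendations based on risk factors"""
--     recommendations = []
--
--     for factor in risk_factors:
--         if "slippage" in factor.lower():
--             recommendations.append("Consider using multiple smaller transactions")
--         elif "gas" in factor.lower():
--             recommendations.append("Wait for lower gas prices or use flashloan gas optimization")
--         elif "liquidity" in factor.lower():
--             recommendations.append("Use multiple DEXs or wait for better liquidity")
--         elif "confidence" in factor.lower():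
--             recommendations.append("Wait for better price confirmation")
--         elif "execution" in factor.lower():
--             recommendations.append("Optimize transaction routing")
--
--     if not recommendations:
--         recommendations.append("Transaction appears safe to execute")
--
--     return recommendations
-- ===== SOURCE B (Python) =====
-- _TABLE = [
--     ("slippage", "Consider using multiple smaller transactions"),
--     ("gas", "Wait for lower gas prices or use flashloan gas optimization"),
--     ("liquidity", "Use multiple DEXs or wait for better liquidity"),
--     ("confidence", "Wait for better price confirmation"),
--     ("execution", "Optimize transaction routing"),
-- ]
--
-- def get_risk_recommendations(risk_factors: list) -> list:
--     """Keyword-major: one sweep per keyword over a slot array (one slot per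
--     factor, in factor order); a slot already filled by a higher-priority
--     keyword is never overwritten, so priority and output order are preserved."""
--     lowered = [f.lower() for f in risk_factors]
--     slots = [None] * len(lowered)
--     for keyword, advice in _TABLE:
--         slots = [advice if slot is None and keyword in s else slot
--                  for slot, s in zip(slots, lowered)]
--     recs = [r for r in slots if r is not None]
--     return recs if recs else ["Transaction appears safe to execute"]
-- ===== Notes on version B (the rewrite author's own statement) =====
-- stated objective: alternative
-- what changed: Inverts the loop nesting: instead of A's factor-major if/elif first-match, B makes one sweep per keyword (keyword-major) over a slot array with one slot per factor, never overwriting a slot filled by an earlier (higher-priority) keyword, then compacts the slots; correctness needs the proof that this traversal order yields the same first-match result per factor.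
import Mathlib
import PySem

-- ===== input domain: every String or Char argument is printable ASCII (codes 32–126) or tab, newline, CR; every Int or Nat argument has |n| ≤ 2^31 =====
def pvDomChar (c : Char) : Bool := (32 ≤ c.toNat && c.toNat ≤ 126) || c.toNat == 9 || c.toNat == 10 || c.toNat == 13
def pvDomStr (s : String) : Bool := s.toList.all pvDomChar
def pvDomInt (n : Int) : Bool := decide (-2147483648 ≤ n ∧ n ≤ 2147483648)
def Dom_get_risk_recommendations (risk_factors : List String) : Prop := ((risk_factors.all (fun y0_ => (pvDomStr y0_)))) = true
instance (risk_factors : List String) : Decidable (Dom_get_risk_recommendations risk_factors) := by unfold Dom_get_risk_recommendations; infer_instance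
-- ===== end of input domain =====

-- B inverts the loop nesting: one sweep per keyword over a slot array (one slot per factor),
-- never overwriting an already-filled slot, then compacts (objective: alternative traversal order).

-- ===== PORT A =====
-- literal transliteration of A: per-factor if/elif chain, each branch lowering the factor again
def get_risk_recommendations (risk_factors : List String) : List String :=
  let recommendations := risk_factors.foldl (fun recommendations factor =>
    if PySem.Str.isIn "slippage" (PySem.Str.lower factor) then
      recommendations ++ ["Consider using multiple smaller transactions"]
    else if PySem.Str.isIn "gas" (PySem.Str.lower factor) then
      recommendations ++ ["Wait for lower gas prices or use flashloan gas optimization"]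
    else if PySem.Str.isIn "liquidity" (PySem.Str.lower factor) then
      recommendations ++ ["Use multiple DEXs or wait for better liquidity"]
    else if PySem.Str.isIn "confidence" (PySem.Str.lower factor) then
      recommendations ++ ["Wait for better price confirmation"]
    else if PySem.Str.isIn "execution" (PySem.Str.lower factor) then
      recommendations ++ ["Optimize transaction routing"]
    else recommendations) []
  if recommendations = [] then recommendations ++ ["Transaction appears safe to execute"]
  else recommendations

-- ===== PORT B =====
-- Source B's ordered keyword → advice table
def riskTable : List (String × String) :=
  [("slippage", "Consider using multiple smaller transactions"),
   ("gas", "Wait for lower gas prices or use flashloan gas optimization"),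
   ("liquidity", "Use multiple DEXs or wait for better liquidity"),
   ("confidence", "Wait for better price confirmation"),
   ("execution", "Optimize transaction routing")]

-- transliteration of Source B: lower every factor once, run one sweep per keyword over the slot
-- array (the zip comprehension), then compact the slots; fallback if nothing was filled
def get_risk_recommendations_alt (risk_factors : List String) : List String :=
  let lowered := risk_factors.map PySem.Str.lower
  let slots := riskTable.foldl (fun slots kwAdv =>
      (slots.zip lowered).map (fun q =>
        if q.1 = none ∧ PySem.Str.isIn kwAdv.1 q.2 then some kwAdv.2 else q.1))
    (List.replicate lowered.length (none : Option String))
  let recs := slots.filterMap id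
  if recs = [] then ["Transaction appears safe to execute"] else recs

-- ===== PRECONDITION & SPEC =====
def Spec_get_risk_recommendations (risk_factors : List String) (out : List String) : Prop := out = get_risk_recommendations_alt risk_factors
instance (risk_factors : List String) (out : List String) : Decidable (Spec_get_risk_recommendations risk_factors out) := by unfold Spec_get_risk_recommendations; infer_instance

-- ===== CLAIM =====
def Claim_equal_get_risk_recommendations : Prop := ∀ (risk_factors : List String), Dom_get_risk_recommendations risk_factors → Spec_get_risk_recommendations risk_factors (get_risk_recommendations risk_factors)

-- ===== LEMMAS AND PROOFS =====
-- zip of a mapped list with itself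
theorem zip_map_self {α β : Type} (f : α → β) (l : List α) :
    (l.map f).zip l = l.map (fun s => (f s, s)) := by
  induction l with
  | nil => rfl
  | cons a l ih => simp [ih]

-- first-match over a keyword table (the reference shape both sides are reduced to)
def chainMatch : List (String × String) → String → Option String
  | [], _ => none
  | (kw, adv) :: rest, s => if PySem.Str.isIn kw s then some adv else chainMatch rest s

-- keyword-major sweeps starting from slots = lowered.map f end at per-factor orElse of f and chainMatch
theorem sweeps_eq (tbl : List (String × String)) (lowered : List String)
    (f : String → Option String) :
    tbl.foldl (fun slots kwAdv =>
      (slots.zip lowered).map (fun q =>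
        if q.1 = none ∧ PySem.Str.isIn kwAdv.1 q.2 then some kwAdv.2 else q.1))
      (lowered.map f) =
    lowered.map (fun s => (f s).orElse (fun _ => chainMatch tbl s)) := by
  induction tbl generalizing f with
  | nil =>
      simp only [List.foldl_nil, chainMatch]
      refine List.map_congr_left (fun s _ => ?_)
      cases f s <;> rfl
  | cons kwAdv rest ih =>
      obtain ⟨kw, adv⟩ := kwAdv
      simp only [List.foldl_cons]
      have hz : (lowered.map f).zip lowered = lowered.map (fun s => (f s, s)) :=
        zip_map_self f lowered
      rw [hz, List.map_map]
      have : ((fun q : Option String × String =>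
          if q.1 = none ∧ PySem.Str.isIn kw q.2 then some adv else q.1) ∘
          fun s => (f s, s)) =
          fun s => if f s = none ∧ PySem.Str.isIn kw s then some adv else f s := rfl
      rw [this, ih]
      refine List.map_congr_left (fun s _ => ?_)
      cases hfs : f s with
      | some a => simp [Option.orElse]
      | none =>
          simp only [chainMatch, Option.orElse, PySem.Str.isIn_eq]
          by_cases hin : PySem.Chars.isIn kw.toList s.toList = true <;> simp [hin]

-- A's per-factor step is append of chainMatch on the concrete table
theorem step_eq (acc : List String) (factor : String) :
    (if PySem.Str.isIn "slippage" (PySem.Str.lower factor) then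
      acc ++ ["Consider using multiple smaller transactions"]
    else if PySem.Str.isIn "gas" (PySem.Str.lower factor) then
      acc ++ ["Wait for lower gas prices or use flashloan gas optimization"]
    else if PySem.Str.isIn "liquidity" (PySem.Str.lower factor) then
      acc ++ ["Use multiple DEXs or wait for better liquidity"]
    else if PySem.Str.isIn "confidence" (PySem.Str.lower factor) then
      acc ++ ["Wait for better price confirmation"]
    else if PySem.Str.isIn "execution" (PySem.Str.lower factor) then
      acc ++ ["Optimize transaction routing"]
    else acc) =
    acc ++ (chainMatch riskTable (PySem.Str.lower factor)).toList := by
  simp only [riskTable, chainMatch]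
  split_ifs <;> simp

-- folding append-of-optional equals filterMap
theorem foldl_append_toList (g : String → Option String) (l : List String) (acc : List String) :
    l.foldl (fun acc x => acc ++ (g x).toList) acc = acc ++ l.filterMap g := by
  induction l generalizing acc with
  | nil => simp
  | cons a l ih =>
      simp only [List.foldl_cons, List.filterMap_cons, ih]
      cases g a <;> simp

-- ===== VERDICT =====
theorem get_risk_recommendations_spec : Claim_equal_get_risk_recommendations := by
  intro risk_factors _
  unfold Spec_get_risk_recommendations get_risk_recommendations get_risk_recommendations_alt
  dsimp only
  have hrep : List.replicate (risk_factors.map PySem.Str.lower).length (none : Option String) =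
      (risk_factors.map PySem.Str.lower).map (fun _ => none) := by
    simp [Function.comp_def, List.map_const']
  rw [hrep, sweeps_eq]
  have hA : risk_factors.foldl (fun recommendations factor =>
      if PySem.Str.isIn "slippage" (PySem.Str.lower factor) then
        recommendations ++ ["Consider using multiple smaller transactions"]
      else if PySem.Str.isIn "gas" (PySem.Str.lower factor) then
        recommendations ++ ["Wait for lower gas prices or use flashloan gas optimization"]
      else if PySem.Str.isIn "liquidity" (PySem.Str.lower factor) then
        recommendations ++ ["Use multiple DEXs or wait for better liquidity"]
      else if PySem.Str.isIn "confidence" (PySem.Str.lower factor) then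
        recommendations ++ ["Wait for better price confirmation"]
      else if PySem.Str.isIn "execution" (PySem.Str.lower factor) then
        recommendations ++ ["Optimize transaction routing"]
      else recommendations) [] =
      risk_factors.filterMap (fun factor => chainMatch riskTable (PySem.Str.lower factor)) := by
    have := foldl_append_toList (fun factor => chainMatch riskTable (PySem.Str.lower factor))
      risk_factors []
    simp only [List.nil_append] at this
    rw [← this]
    congr 1
    funext acc f
    exact step_eq acc f
  rw [hA]
  have hB : ((risk_factors.map PySem.Str.lower).map
        (fun s => (none : Option String).orElse (fun _ => chainMatch riskTable s))).filterMap id =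
      risk_factors.filterMap (fun factor => chainMatch riskTable (PySem.Str.lower factor)) := by
    simp [List.filterMap_map, Option.orElse, Function.comp]
  rw [hB]
  split <;> simp_all
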